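-- pv_equiv track=rewrite | github.com/ASSERT-KTH/Supersonic | src/evaluation/generate_predicted_submissions.py | is_valid_hunk
-- ===== SOURCE A (Python) =====
-- from typing import Sequence
--
-- def is_valid_hunk(hunk_lines: Sequence[str]):
--     # Find the hunk starting and ending lines
--     hunk_start = -1
--     hunk_end = -1
--     for index, line in enumerate(hunk_lines):
--         if line.startswith(('-', '+')):
--             hunk_start = index
--             break
--
--     for index, line in enumerate(hunk_lines[::-1]):
--         if line.startswith(('-', '+')):
--             hunk_end = len(hunk_lines) - index
--             break
--
--     # If we did not even find the start and end line, it is not valid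
--     if hunk_start == -1 or hunk_end == -1:
--         return False
--
--     # If all lines does not start with '-' or '+' in the hunk, it is not valid
--     for line in hunk_lines[hunk_start: hunk_end]:
--         if not line.startswith(('-', '+')):
--             return False
--
--     signs = [
--         line[0]
--         for line in hunk_lines[hunk_start: hunk_end]
--     ]
--     # If we only have a single sign, it is a pure-addition or deletion
--     # patch, ie. valid.
--     if len(set(signs)) == 1:
--         return True
--
--     # It can only be a replacement patch, therefore the last index of '-'
--     # must be less than the first index of '+'
--     if len(signs) - signs[::-1].index('-') - 1 > signs.index('+'):
--         return False
--
--     return True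
-- ===== SOURCE B (Python) =====
-- def is_valid_hunk(hunk_lines):
--     # Single left-to-right state machine over the lines:
--     # 0 = before the sign block, 1 = in the '-' run, 2 = in the '+' run,
--     # 3 = past the sign block, 4 = invalid.
--     state = 0
--     for line in hunk_lines:
--         if line.startswith('-'):
--             c = '-'
--         elif line.startswith('+'):
--             c = '+'
--         else:
--             c = None
--         if state == 0:
--             state = 1 if c == '-' else 2 if c == '+' else 0
--         elif state == 1:
--             state = 1 if c == '-' else 2 if c == '+' else 3
--         elif state == 2:
--             state = 3 if c is None else 2 if c == '+' else 4
--         elif state == 3: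
--             state = 3 if c is None else 4
--         else:
--             break
--     return state in (1, 2, 3)
-- ===== Notes on version B (the rewrite author's own statement) =====
-- stated objective: simpler
-- what changed: Replaced the forward scan + reversed scan + slice + set/index/reverse-index arithmetic with a single left-to-right state-machine pass (before-block / minus-run / plus-run / after-block / invalid) accepting non-failure states that saw a sign.
import Mathlib
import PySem

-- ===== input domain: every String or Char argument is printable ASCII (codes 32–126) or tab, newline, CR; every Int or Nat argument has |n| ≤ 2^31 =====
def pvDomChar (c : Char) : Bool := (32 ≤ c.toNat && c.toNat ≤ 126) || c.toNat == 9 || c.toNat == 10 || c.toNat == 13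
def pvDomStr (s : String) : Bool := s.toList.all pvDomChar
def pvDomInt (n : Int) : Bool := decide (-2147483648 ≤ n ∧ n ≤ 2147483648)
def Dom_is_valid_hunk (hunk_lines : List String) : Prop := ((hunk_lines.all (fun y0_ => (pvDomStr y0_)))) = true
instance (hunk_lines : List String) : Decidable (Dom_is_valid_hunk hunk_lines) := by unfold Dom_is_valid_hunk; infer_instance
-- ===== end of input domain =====

-- B replaces A's forward scan + reversed scan + slice + set/index arithmetic by a single
-- left-to-right state-machine pass (simpler, same O(n) cost); return values proved equal on all inputs.


-- ===== PORT A =====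
-- line.startswith(('-', '+'))
def isSignA (line : String) : Bool :=
  PySem.Str.startswith line "-" || PySem.Str.startswith line "+"

-- first loop: enumerate + break, returning the index of the first sign line (else -1)
def findStartA : List String → Int → Int
  | [], _ => -1
  | l :: ls, i => if isSignA l then i else findStartA ls (i + 1)

-- second loop, over hunk_lines[::-1]: hunk_end = len(hunk_lines) - index at the first sign (else -1)
def findEndA : List String → Int → Int → Int
  | [], _, _ => -1
  | l :: ls, i, n => if isSignA l then n - i else findEndA ls (i + 1) n

-- third loop: 'if not line.startswith(('-','+')): return False'
def allSignA : List String → Bool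
  | [] => true
  | l :: ls => if !(isSignA l) then false else allSignA ls

-- line[0]; every line this is applied to starts with a sign, hence is nonempty: exact (see proof)
def firstCharA (line : String) : Char :=
  (PySem.Str.pyGet? line 0).getD ' '

def is_valid_hunk (hunk_lines : List String) : Bool :=
  let hunk_start := findStartA hunk_lines 0
  let hunk_end := findEndA ((PySem.List.slice? hunk_lines none none (-1)).getD []) 0 (hunk_lines.length : Int)
  if hunk_start == -1 || hunk_end == -1 then false
  else
    let block := PySem.List.slice hunk_lines (some hunk_start) (some hunk_end)
    if !(allSignA block) then false
    else
      let signs := block.map firstCharA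
      if PySem.Set.len (PySem.Set.ofList signs) = 1 then true
      else
        -- here both '-' and '+' occur in signs (see proof), so Python's .index never raises: exact
        let revIdx : Nat := (PySem.List.index? ((PySem.List.slice? signs none none (-1)).getD []) '-').getD 0
        let pIdx : Nat := (PySem.List.index? signs '+').getD 0
        if (signs.length : Int) - (revIdx : Int) - 1 > (pIdx : Int) then false else true

-- ===== PORT B =====
-- classify a line: some '-' / some '+' / none
def lineChar (line : String) : Option Char :=
  if PySem.Str.startswith line "-" then some '-'
  else if PySem.Str.startswith line "+" then some '+'
  else none

-- one transition of the state machine (0 before block, 1 '-' run, 2 '+' run, 3 after block, 4 invalid)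
def stepB (state : Int) (c : Option Char) : Int :=
  if state = 0 then (if c = some '-' then 1 else if c = some '+' then 2 else 0)
  else if state = 1 then (if c = some '-' then 1 else if c = some '+' then 2 else 3)
  else if state = 2 then (if c = none then 3 else if c = some '+' then 2 else 4)
  else if state = 3 then (if c = none then 3 else 4)
  else state  -- state 4: the Python loop breaks; 4 is absorbing, so folding on is exact

def is_valid_hunk_alt (hunk_lines : List String) : Bool :=
  let state := hunk_lines.foldl (fun st line => stepB st (lineChar line)) 0
  state == 1 || state == 2 || state == 3

-- ===== PRECONDITION & SPEC =====
def Spec_is_valid_hunk (hunk_lines : List String) (out : Bool) : Prop := out = is_valid_hunk_alt hunk_lines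
instance (hunk_lines : List String) (out : Bool) : Decidable (Spec_is_valid_hunk hunk_lines out) := by unfold Spec_is_valid_hunk; infer_instance

-- ===== CLAIM (what is proved, stated in full; the proofs are below) =====
def Claim_equal_is_valid_hunk : Prop := ∀ (hunk_lines : List String), Dom_is_valid_hunk hunk_lines → Spec_is_valid_hunk hunk_lines (is_valid_hunk hunk_lines)

-- ===== LEMMAS AND PROOFS =====

-- canonical recursive form of the validity predicate (proof helper, used by both directions)
def tailOK (ls : List String) : Bool := ls.all (fun l => !isSignA l)

def plusOK : List String → Bool
  | [] => true
  | l :: ls =>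
    if PySem.Str.startswith l "+" then plusOK ls
    else if isSignA l then false
    else tailOK ls

def minusOK : List String → Bool
  | [] => true
  | l :: ls =>
    if PySem.Str.startswith l "-" then minusOK ls
    else if PySem.Str.startswith l "+" then plusOK ls
    else tailOK ls

def headOK : List String → Bool
  | [] => false
  | l :: ls =>
    if PySem.Str.startswith l "-" then minusOK ls
    else if PySem.Str.startswith l "+" then plusOK ls
    else headOK ls

def foldB (s : Int) (ls : List String) : Int := ls.foldl (fun st line => stepB st (lineChar line)) s

def accB (s : Int) : Bool := s == 1 || s == 2 || s == 3

-- equation shapes (rfl) so that `rw` never has to look through `match`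
theorem plusOK_cons (z : String) (zs : List String) :
    plusOK (z :: zs) = (if PySem.Str.startswith z "+" then plusOK zs
      else if isSignA z then false else tailOK zs) := rfl

theorem minusOK_cons (z : String) (zs : List String) :
    minusOK (z :: zs) = (if PySem.Str.startswith z "-" then minusOK zs
      else if PySem.Str.startswith z "+" then plusOK zs else tailOK zs) := rfl

theorem headOK_cons (z : String) (zs : List String) :
    headOK (z :: zs) = (if PySem.Str.startswith z "-" then minusOK zs
      else if PySem.Str.startswith z "+" then plusOK zs else headOK zs) := rfl

theorem findStartA_cons (z : String) (zs : List String) (i : Int) :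
    findStartA (z :: zs) i = (if isSignA z then i else findStartA zs (i + 1)) := rfl

theorem findStartA_nil (i : Int) : findStartA [] i = -1 := rfl

theorem findEndA_cons (z : String) (zs : List String) (i n : Int) :
    findEndA (z :: zs) i n = (if isSignA z then n - i else findEndA zs (i + 1) n) := rfl

theorem findEndA_nil (i n : Int) : findEndA [] i n = -1 := rfl

theorem allSignA_cons (z : String) (zs : List String) :
    allSignA (z :: zs) = (if !(isSignA z) then false else allSignA zs) := rfl

theorem ne_true_of_false {b : Bool} (h : b = false) : ¬ (b = true) := by
  rw [h]; exact Bool.false_ne_true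

-- ---- elementary facts about sign prefixes and first characters ----

theorem startswith_minus_firstChar (l : String) (h : PySem.Str.startswith l "-" = true) :
    firstCharA l = '-' := by
  have h' : ['-'] <+: l.toList := (PySem.Chars.startswith_iff l.toList ['-']).mp (by simpa using h)
  obtain ⟨t, ht⟩ := h'
  unfold firstCharA
  simp [← ht]

theorem startswith_plus_firstChar (l : String) (h : PySem.Str.startswith l "+" = true) :
    firstCharA l = '+' := by
  have h' : ['+'] <+: l.toList := (PySem.Chars.startswith_iff l.toList ['+']).mp (by simpa using h)
  obtain ⟨t, ht⟩ := h'
  unfold firstCharA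
  simp [← ht]

theorem not_both_signs (l : String) (h : PySem.Str.startswith l "-" = true) :
    PySem.Str.startswith l "+" = false := by
  cases hp : PySem.Str.startswith l "+"
  · rfl
  · have h1 := startswith_minus_firstChar l h
    have h2 := startswith_plus_firstChar l hp
    rw [h1] at h2
    exact absurd h2 (by decide)

theorem not_minus_of_plus (l : String) (h : PySem.Str.startswith l "+" = true) :
    PySem.Str.startswith l "-" = false := by
  cases hm : PySem.Str.startswith l "-"
  · rfl
  · have := not_both_signs l hm
    rw [h] at this
    exact absurd this (by simp)

theorem sign_cases (l : String) (h : isSignA l = true) :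
    PySem.Str.startswith l "-" = true ∨ PySem.Str.startswith l "+" = true := by
  unfold isSignA at h
  exact Bool.or_eq_true_iff.mp h

theorem nonsign_split (l : String) (h : isSignA l = false) :
    PySem.Str.startswith l "-" = false ∧ PySem.Str.startswith l "+" = false := by
  unfold isSignA at h
  exact Bool.or_eq_false_iff.mp h

theorem nonsign_of_parts (z : String) (hm : PySem.Str.startswith z "-" = false)
    (hp : PySem.Str.startswith z "+" = false) : isSignA z = false := by
  unfold isSignA
  rw [hm, hp]
  rfl

theorem firstChar_minus_startswith (l : String) (hs : isSignA l = true) (h : firstCharA l = '-') :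
    PySem.Str.startswith l "-" = true := by
  rcases sign_cases l hs with h' | h'
  · exact h'
  · have := startswith_plus_firstChar l h'
    rw [h] at this
    exact absurd this (by decide)

theorem firstChar_plus_startswith (l : String) (hs : isSignA l = true) (h : firstCharA l = '+') :
    PySem.Str.startswith l "+" = true := by
  rcases sign_cases l hs with h' | h'
  · have := startswith_minus_firstChar l h'
    rw [h] at this
    exact absurd this (by decide)
  · exact h'

theorem sign_firstChar_cases (l : String) (hs : isSignA l = true) :
    firstCharA l = '-' ∨ firstCharA l = '+' := by
  rcases sign_cases l hs with h' | h'
  · exact Or.inl (startswith_minus_firstChar l h')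
  · exact Or.inr (startswith_plus_firstChar l h')

theorem lineChar_minus (z : String) (hm : PySem.Str.startswith z "-" = true) :
    lineChar z = some '-' := by
  unfold lineChar; rw [if_pos hm]

theorem lineChar_plus (z : String) (hm : PySem.Str.startswith z "-" = false)
    (hp : PySem.Str.startswith z "+" = true) : lineChar z = some '+' := by
  unfold lineChar; rw [if_neg (ne_true_of_false hm), if_pos hp]

theorem lineChar_none (z : String) (hm : PySem.Str.startswith z "-" = false)
    (hp : PySem.Str.startswith z "+" = false) : lineChar z = none := by
  unfold lineChar; rw [if_neg (ne_true_of_false hm), if_neg (ne_true_of_false hp)]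

theorem sign_of_plus (z : String) (hp : PySem.Str.startswith z "+" = true) : isSignA z = true := by
  unfold isSignA; rw [hp]; simp

theorem sign_of_minus (z : String) (hm : PySem.Str.startswith z "-" = true) : isSignA z = true := by
  unfold isSignA; rw [hm]; simp

theorem tailOK_cons (z : String) (zs : List String) :
    tailOK (z :: zs) = (!isSignA z && tailOK zs) := by
  simp [tailOK]

-- ---- B equals headOK ----

theorem foldB_cons (s : Int) (z : String) (zs : List String) :
    foldB s (z :: zs) = foldB (stepB s (lineChar z)) zs := rfl

theorem foldB_four (ls : List String) : foldB 4 ls = 4 := by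
  induction ls with
  | nil => rfl
  | cons z zs ih =>
    rw [foldB_cons]
    have h : stepB 4 (lineChar z) = 4 := by
      unfold stepB
      rw [if_neg (by norm_num), if_neg (by norm_num), if_neg (by norm_num), if_neg (by norm_num)]
    rw [h, ih]

theorem foldB_three (ls : List String) : foldB 3 ls = (if tailOK ls then 3 else 4) := by
  induction ls with
  | nil => rfl
  | cons z zs ih =>
    rw [foldB_cons]
    by_cases hm : PySem.Str.startswith z "-" = true
    · rw [lineChar_minus z hm, show stepB 3 (some '-') = 4 from by decide, foldB_four,
        tailOK_cons, sign_of_minus z hm]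
      rfl
    · have hm' : PySem.Str.startswith z "-" = false := by simpa using hm
      by_cases hp : PySem.Str.startswith z "+" = true
      · rw [lineChar_plus z hm' hp, show stepB 3 (some '+') = 4 from by decide, foldB_four,
          tailOK_cons, sign_of_plus z hp]
        rfl
      · have hp' : PySem.Str.startswith z "+" = false := by simpa using hp
        rw [lineChar_none z hm' hp', show stepB 3 none = 3 from by decide, ih,
          tailOK_cons, nonsign_of_parts z hm' hp']
        simp only [Bool.not_false, Bool.true_and]

theorem foldB_two (ls : List String) : accB (foldB 2 ls) = plusOK ls := by
  induction ls with
  | nil => rfl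
  | cons z zs ih =>
    rw [foldB_cons]
    by_cases hp : PySem.Str.startswith z "+" = true
    · rw [lineChar_plus z (not_minus_of_plus z hp) hp,
        show stepB 2 (some '+') = 2 from by decide, ih, plusOK_cons, if_pos hp]
    · have hp' : PySem.Str.startswith z "+" = false := by simpa using hp
      by_cases hm : PySem.Str.startswith z "-" = true
      · rw [lineChar_minus z hm, show stepB 2 (some '-') = 4 from by decide, foldB_four,
          plusOK_cons, if_neg (ne_true_of_false hp'), if_pos (sign_of_minus z hm)]
        rfl
      · have hm' : PySem.Str.startswith z "-" = false := by simpa using hm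
        rw [lineChar_none z hm' hp', show stepB 2 none = 3 from by decide, foldB_three,
          plusOK_cons, if_neg (ne_true_of_false hp'),
          if_neg (ne_true_of_false (nonsign_of_parts z hm' hp'))]
        cases htx : tailOK zs
        · decide
        · decide

theorem foldB_one (ls : List String) : accB (foldB 1 ls) = minusOK ls := by
  induction ls with
  | nil => rfl
  | cons z zs ih =>
    rw [foldB_cons]
    by_cases hm : PySem.Str.startswith z "-" = true
    · rw [lineChar_minus z hm, show stepB 1 (some '-') = 1 from by decide, ih,
        minusOK_cons, if_pos hm]
    · have hm' : PySem.Str.startswith z "-" = false := by simpa using hm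
      by_cases hp : PySem.Str.startswith z "+" = true
      · rw [lineChar_plus z hm' hp, show stepB 1 (some '+') = 2 from by decide, foldB_two,
          minusOK_cons, if_neg (ne_true_of_false hm'), if_pos hp]
      · have hp' : PySem.Str.startswith z "+" = false := by simpa using hp
        rw [lineChar_none z hm' hp', show stepB 1 none = 3 from by decide, foldB_three,
          minusOK_cons, if_neg (ne_true_of_false hm'), if_neg (ne_true_of_false hp')]
        cases htx : tailOK zs
        · decide
        · decide

theorem foldB_zero (hl : List String) : accB (foldB 0 hl) = headOK hl := by
  induction hl with
  | nil => rfl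
  | cons z zs ih =>
    rw [foldB_cons]
    by_cases hm : PySem.Str.startswith z "-" = true
    · rw [lineChar_minus z hm, show stepB 0 (some '-') = 1 from by decide, foldB_one,
        headOK_cons, if_pos hm]
    · have hm' : PySem.Str.startswith z "-" = false := by simpa using hm
      by_cases hp : PySem.Str.startswith z "+" = true
      · rw [lineChar_plus z hm' hp, show stepB 0 (some '+') = 2 from by decide, foldB_two,
          headOK_cons, if_neg (ne_true_of_false hm'), if_pos hp]
      · have hp' : PySem.Str.startswith z "+" = false := by simpa using hp
        rw [lineChar_none z hm' hp', show stepB 0 none = 0 from by decide, ih,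
          headOK_cons, if_neg (ne_true_of_false hm'), if_neg (ne_true_of_false hp')]

theorem B_eq_headOK (hl : List String) : is_valid_hunk_alt hl = headOK hl :=
  foldB_zero hl

-- ---- characterizations of A's scans ----

theorem allNonsign_cons_sign {z : String} (zs : List String) (hz : isSignA z = true) :
    (z :: zs).all (fun l => !isSignA l) = false := by
  simp [hz]

theorem allNonsign_cons_nonsign {z : String} (zs : List String) (hz : isSignA z = false) :
    (z :: zs).all (fun l => !isSignA l) = zs.all (fun l => !isSignA l) := by
  simp [hz]

theorem findStartA_neg_iff (ls : List String) (i : Int) (hi : 0 ≤ i) :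
    findStartA ls i = -1 ↔ ls.all (fun l => !isSignA l) = true := by
  induction ls generalizing i with
  | nil => simp [findStartA_nil]
  | cons z zs ih =>
    by_cases hz : isSignA z = true
    · rw [findStartA_cons, if_pos hz, allNonsign_cons_sign zs hz]
      constructor
      · intro h; omega
      · intro h; exact absurd h (by simp)
    · have hz' : isSignA z = false := by simpa using hz
      rw [findStartA_cons, if_neg (ne_true_of_false hz'), allNonsign_cons_nonsign zs hz',
        ih (i + 1) (by omega)]

theorem findStartA_shift (ls : List String) (i : Int) :
    findStartA ls (i + 1) = (if ls.all (fun l => !isSignA l) then -1 else findStartA ls i + 1) := by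
  induction ls generalizing i with
  | nil => simp [findStartA_nil]
  | cons z zs ih =>
    by_cases hz : isSignA z = true
    · rw [findStartA_cons, if_pos hz, findStartA_cons, if_pos hz, allNonsign_cons_sign zs hz]
      rfl
    · have hz' : isSignA z = false := by simpa using hz
      rw [findStartA_cons, if_neg (ne_true_of_false hz'), findStartA_cons,
        if_neg (ne_true_of_false hz'), allNonsign_cons_nonsign zs hz', ih (i + 1)]

theorem findStartA_bounds (ls : List String) (i : Int) (hi : 0 ≤ i)
    (h : findStartA ls i ≠ -1) : i ≤ findStartA ls i ∧ findStartA ls i < i + ls.length := by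
  induction ls generalizing i with
  | nil => rw [findStartA_nil] at h; exact absurd rfl h
  | cons z zs ih =>
    by_cases hz : isSignA z = true
    · rw [findStartA_cons, if_pos hz]
      simp only [List.length_cons]
      push_cast
      omega
    · have hz' : isSignA z = false := by simpa using hz
      rw [findStartA_cons, if_neg (ne_true_of_false hz')] at h ⊢
      have := ih (i + 1) (by omega) h
      simp only [List.length_cons]
      push_cast at this ⊢
      omega

theorem findEndA_neg_iff (ls : List String) (i n : Int) (hi : 0 ≤ i) (hn : i + ls.length ≤ n) :
    findEndA ls i n = -1 ↔ ls.all (fun l => !isSignA l) = true := by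
  induction ls generalizing i with
  | nil => simp [findEndA_nil]
  | cons z zs ih =>
    simp only [List.length_cons] at hn
    push_cast at hn
    by_cases hz : isSignA z = true
    · rw [findEndA_cons, if_pos hz, allNonsign_cons_sign zs hz]
      constructor
      · intro h; omega
      · intro h; exact absurd h (by simp)
    · have hz' : isSignA z = false := by simpa using hz
      rw [findEndA_cons, if_neg (ne_true_of_false hz'), allNonsign_cons_nonsign zs hz',
        ih (i + 1) (by omega) (by omega)]

theorem findEndA_shift_i (ls : List String) (i n : Int) :
    findEndA ls (i + 1) n = (if ls.all (fun l => !isSignA l) then -1 else findEndA ls i n - 1) := by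
  induction ls generalizing i with
  | nil => simp [findEndA_nil]
  | cons z zs ih =>
    by_cases hz : isSignA z = true
    · rw [findEndA_cons, if_pos hz, findEndA_cons, if_pos hz, allNonsign_cons_sign zs hz]
      simp only [Bool.false_eq_true, if_false]
      ring
    · have hz' : isSignA z = false := by simpa using hz
      rw [findEndA_cons, if_neg (ne_true_of_false hz'), findEndA_cons,
        if_neg (ne_true_of_false hz'), allNonsign_cons_nonsign zs hz', ih (i + 1)]

theorem findEndA_shift_n (ls : List String) (i n : Int) :
    findEndA ls i (n + 1) = (if ls.all (fun l => !isSignA l) then -1 else findEndA ls i n + 1) := by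
  induction ls generalizing i with
  | nil => simp [findEndA_nil]
  | cons z zs ih =>
    by_cases hz : isSignA z = true
    · rw [findEndA_cons, if_pos hz, findEndA_cons, if_pos hz, allNonsign_cons_sign zs hz]
      simp only [Bool.false_eq_true, if_false]
      ring
    · have hz' : isSignA z = false := by simpa using hz
      rw [findEndA_cons, if_neg (ne_true_of_false hz'), findEndA_cons,
        if_neg (ne_true_of_false hz'), allNonsign_cons_nonsign zs hz', ih (i + 1)]

theorem findEndA_bounds (ls : List String) (i n : Int) (hi : 0 ≤ i)
    (h : findEndA ls i n ≠ -1) :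
    n - (i + ls.length) < findEndA ls i n ∧ findEndA ls i n ≤ n - i := by
  induction ls generalizing i with
  | nil => rw [findEndA_nil] at h; exact absurd rfl h
  | cons z zs ih =>
    by_cases hz : isSignA z = true
    · rw [findEndA_cons, if_pos hz]
      simp only [List.length_cons]
      push_cast
      omega
    · have hz' : isSignA z = false := by simpa using hz
      rw [findEndA_cons, if_neg (ne_true_of_false hz')] at h ⊢
      have := ih (i + 1) (by omega) h
      simp only [List.length_cons]
      push_cast at this ⊢
      omega

theorem findStartA_append_nonsign (ys : List String) (y : String)
    (hy : isSignA y = false) (i : Int) :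
    findStartA (ys ++ [y]) i = findStartA ys i := by
  induction ys generalizing i with
  | nil =>
    simp only [List.nil_append]
    rw [findStartA_cons, if_neg (ne_true_of_false hy), findStartA_nil, findStartA_nil]
  | cons z zs ih =>
    rw [List.cons_append, findStartA_cons, findStartA_cons, ih]

theorem findEndA_append_nonsign (ys : List String) (y : String)
    (hy : isSignA y = false) (i n : Int) :
    findEndA (ys ++ [y]) i n = findEndA ys i n := by
  induction ys generalizing i with
  | nil =>
    simp only [List.nil_append]
    rw [findEndA_cons, if_neg (ne_true_of_false hy), findEndA_nil, findEndA_nil]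
  | cons z zs ih =>
    rw [List.cons_append, findEndA_cons, findEndA_cons, ih]

theorem allSignA_eq_all (ls : List String) : allSignA ls = ls.all (fun l => isSignA l) := by
  induction ls with
  | nil => rfl
  | cons z zs ih =>
    rw [allSignA_cons]
    by_cases hz : isSignA z = true
    · rw [hz]
      simp [hz, ih]
    · have hz' : isSignA z = false := by simpa using hz
      rw [hz']
      simp [hz']

theorem pvGuardFalse (a b : Int) (ha : a ≠ -1) (hb : b ≠ -1) : (a == -1 || b == -1) = false := by
  simp [ha, hb]

-- ---- strip lemmas for A ----

theorem A_stripL (l : String) (ls : List String) (h : isSignA l = false) :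
    is_valid_hunk (l :: ls) = is_valid_hunk ls := by
  simp only [is_valid_hunk, PySem.List.slice?_none_none_neg_one, Option.getD_some,
    List.reverse_cons]
  rw [findEndA_append_nonsign ls.reverse l h]
  rw [findStartA_cons, if_neg (ne_true_of_false h)]
  by_cases hall : ls.all (fun l => !isSignA l) = true
  · have h1 : findStartA ls 1 = -1 := (findStartA_neg_iff ls 1 (by omega)).mpr hall
    have h0 : findStartA ls 0 = -1 := (findStartA_neg_iff ls 0 (by omega)).mpr hall
    have hrall : ls.reverse.all (fun l => !isSignA l) = true := by simpa using hall
    have he1 : findEndA ls.reverse 0 ((l :: ls).length : Int) = -1 :=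
      (findEndA_neg_iff ls.reverse 0 _ (by omega) (by simp)).mpr hrall
    have he0 : findEndA ls.reverse 0 (ls.length : Int) = -1 :=
      (findEndA_neg_iff ls.reverse 0 _ (by omega) (by simp)).mpr hrall
    rw [show findStartA ls (0 + 1) = findStartA ls 1 from by norm_num, h1, h0, he1, he0]
    simp
  · have hall' : ls.all (fun l => !isSignA l) = false := by simpa using hall
    have hrall : ls.reverse.all (fun l => !isSignA l) = false := by simpa using hall'
    have h1 : findStartA ls (0 + 1) = findStartA ls 0 + 1 := by
      rw [findStartA_shift ls 0, if_neg (ne_true_of_false hall')]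
    have hS : findStartA ls 0 ≠ -1 := by
      rw [Ne, findStartA_neg_iff ls 0 (by omega), hall']
      simp
    have hSb := findStartA_bounds ls 0 (by omega) hS
    have hlen : ((l :: ls).length : Int) = (ls.length : Int) + 1 := by
      simp only [List.length_cons]; push_cast; ring
    have h2 : findEndA ls.reverse 0 ((l :: ls).length : Int)
        = findEndA ls.reverse 0 (ls.length : Int) + 1 := by
      rw [hlen, findEndA_shift_n, if_neg (ne_true_of_false hrall)]
    have hE : findEndA ls.reverse 0 (ls.length : Int) ≠ -1 := by
      rw [Ne, findEndA_neg_iff ls.reverse 0 _ (by omega) (by simp), hrall]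
      simp
    have hEb := findEndA_bounds ls.reverse 0 (ls.length : Int) (by omega) hE
    simp only [List.length_reverse] at hEb
    rw [h1, h2]
    set S := findStartA ls 0 with hSdef
    set E := findEndA ls.reverse 0 (ls.length : Int) with hEdef
    have hg1 : (S + 1 == -1 || E + 1 == -1) = false := pvGuardFalse _ _ (by omega) (by omega)
    have hg2 : (S == -1 || E == -1) = false := pvGuardFalse _ _ hS hE
    rw [hg1, hg2]
    simp only [Bool.false_eq_true, if_false]
    have hslice : PySem.List.slice (l :: ls) (some (S + 1)) (some (E + 1))
        = PySem.List.slice ls (some S) (some E) := by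
      rw [PySem.List.slice_toNat, PySem.List.slice_toNat]
      · have ht1 : (S + 1).toNat = S.toNat + 1 := by omega
        rw [ht1, show (E + 1).toNat - (S.toNat + 1) = E.toNat - S.toNat from by omega,
          List.drop_succ_cons]
      all_goals omega
    rw [hslice]

theorem A_stripR (ys : List String) (y : String) (h : isSignA y = false) :
    is_valid_hunk (ys ++ [y]) = is_valid_hunk ys := by
  simp only [is_valid_hunk, PySem.List.slice?_none_none_neg_one, Option.getD_some]
  have hrev : (ys ++ [y]).reverse = y :: ys.reverse := by simp
  rw [hrev, findStartA_append_nonsign ys y h, findEndA_cons, if_neg (ne_true_of_false h)]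
  by_cases hall : ys.all (fun l => !isSignA l) = true
  · have h0 : findStartA ys 0 = -1 := (findStartA_neg_iff ys 0 (by omega)).mpr hall
    have hrall : ys.reverse.all (fun l => !isSignA l) = true := by simpa using hall
    have he1 : findEndA ys.reverse (0 + 1) ((ys ++ [y]).length : Int) = -1 :=
      (findEndA_neg_iff ys.reverse (0 + 1) _ (by omega) (by simp; omega)).mpr hrall
    have he0 : findEndA ys.reverse 0 (ys.length : Int) = -1 :=
      (findEndA_neg_iff ys.reverse 0 _ (by omega) (by simp)).mpr hrall
    rw [h0, he1, he0]
    simp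
  · have hall' : ys.all (fun l => !isSignA l) = false := by simpa using hall
    have hrall : ys.reverse.all (fun l => !isSignA l) = false := by simpa using hall'
    have hlen : ((ys ++ [y]).length : Int) = (ys.length : Int) + 1 := by
      simp only [List.length_append, List.length_cons, List.length_nil]; push_cast; ring
    have h2 : findEndA ys.reverse (0 + 1) ((ys ++ [y]).length : Int)
        = findEndA ys.reverse 0 (ys.length : Int) := by
      rw [findEndA_shift_i, if_neg (ne_true_of_false hrall), hlen,
        findEndA_shift_n, if_neg (ne_true_of_false hrall)]
      ring
    rw [h2]
    have hS : findStartA ys 0 ≠ -1 := by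
      rw [Ne, findStartA_neg_iff ys 0 (by omega), hall']
      simp
    have hSb := findStartA_bounds ys 0 (by omega) hS
    have hE : findEndA ys.reverse 0 (ys.length : Int) ≠ -1 := by
      rw [Ne, findEndA_neg_iff ys.reverse 0 _ (by omega) (by simp), hrall]
      simp
    have hEb := findEndA_bounds ys.reverse 0 (ys.length : Int) (by omega) hE
    simp only [List.length_reverse] at hEb
    set S := findStartA ys 0 with hSdef
    set E := findEndA ys.reverse 0 (ys.length : Int) with hEdef
    have hg : (S == -1 || E == -1) = false := pvGuardFalse _ _ hS hE
    rw [hg]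
    simp only [Bool.false_eq_true, if_false]
    have hslice : PySem.List.slice (ys ++ [y]) (some S) (some E)
        = PySem.List.slice ys (some S) (some E) := by
      rw [PySem.List.slice_toNat, PySem.List.slice_toNat]
      · have hd : (ys ++ [y]).drop S.toNat = ys.drop S.toNat ++ [y] :=
          List.drop_append_of_le_length (by omega)
        rw [hd]
        apply List.take_append_of_le_length
        simp only [List.length_drop]
        omega
      all_goals omega
    rw [hslice]

-- ---- strip lemmas for headOK ----

theorem tailOK_stripR (zs : List String) (y : String) (h : isSignA y = false) :
    tailOK (zs ++ [y]) = tailOK zs := by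
  simp [tailOK, List.all_append, h]

theorem tailOK_append_sign (zs : List String) (y : String) (hy : isSignA y = true) :
    tailOK (zs ++ [y]) = false := by
  simp [tailOK, List.all_append, hy]

theorem plusOK_stripR (zs : List String) (y : String) (h : isSignA y = false) :
    plusOK (zs ++ [y]) = plusOK zs := by
  induction zs with
  | nil =>
    rcases nonsign_split y h with ⟨h1, h2⟩
    simp only [List.nil_append]
    rw [plusOK_cons, if_neg (ne_true_of_false h2), if_neg (ne_true_of_false h)]
    rfl
  | cons z zs ih =>
    rw [List.cons_append, plusOK_cons, plusOK_cons]
    by_cases hp : PySem.Str.startswith z "+" = true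
    · rw [if_pos hp, if_pos hp, ih]
    · rw [if_neg hp, if_neg hp]
      by_cases hz : isSignA z = true
      · rw [if_pos hz, if_pos hz]
      · rw [if_neg hz, if_neg hz, tailOK_stripR _ _ h]

theorem minusOK_stripR (zs : List String) (y : String) (h : isSignA y = false) :
    minusOK (zs ++ [y]) = minusOK zs := by
  induction zs with
  | nil =>
    rcases nonsign_split y h with ⟨h1, h2⟩
    simp only [List.nil_append]
    rw [minusOK_cons, if_neg (ne_true_of_false h1), if_neg (ne_true_of_false h2)]
    rfl
  | cons z zs ih =>
    rw [List.cons_append, minusOK_cons, minusOK_cons]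
    by_cases hm : PySem.Str.startswith z "-" = true
    · rw [if_pos hm, if_pos hm, ih]
    · rw [if_neg hm, if_neg hm]
      by_cases hp : PySem.Str.startswith z "+" = true
      · rw [if_pos hp, if_pos hp, plusOK_stripR _ _ h]
      · rw [if_neg hp, if_neg hp, tailOK_stripR _ _ h]

theorem headOK_stripR (ys : List String) (y : String) (h : isSignA y = false) :
    headOK (ys ++ [y]) = headOK ys := by
  induction ys with
  | nil =>
    rcases nonsign_split y h with ⟨h1, h2⟩
    simp only [List.nil_append]
    rw [headOK_cons, if_neg (ne_true_of_false h1), if_neg (ne_true_of_false h2)]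
  | cons z zs ih =>
    rw [List.cons_append, headOK_cons, headOK_cons]
    by_cases hm : PySem.Str.startswith z "-" = true
    · rw [if_pos hm, if_pos hm, minusOK_stripR _ _ h]
    · rw [if_neg hm, if_neg hm]
      by_cases hp : PySem.Str.startswith z "+" = true
      · rw [if_pos hp, if_pos hp, plusOK_stripR _ _ h]
      · rw [if_neg hp, if_neg hp, ih]

theorem headOK_signHead (l : String) (ls : List String) (h : isSignA l = true) :
    headOK (l :: ls) = minusOK (l :: ls) := by
  rw [headOK_cons, minusOK_cons]
  by_cases hm : PySem.Str.startswith l "-" = true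
  · rw [if_pos hm, if_pos hm]
  · rcases sign_cases l h with h' | h'
    · exact absurd h' hm
    · rw [if_neg hm, if_neg hm, if_pos h', if_pos h']

-- ---- all-sign facts ----

theorem plusOK_allSign (zs : List String) (hall : ∀ u ∈ zs, isSignA u = true) :
    plusOK zs = zs.all (fun u => PySem.Str.startswith u "+") := by
  induction zs with
  | nil => rfl
  | cons z zs ih =>
    rw [plusOK_cons]
    simp only [List.all_cons]
    by_cases hp : PySem.Str.startswith z "+" = true
    · rw [if_pos hp, ih (fun u hu => hall u (List.mem_cons_of_mem _ hu)), hp]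
      rfl
    · have hp' : PySem.Str.startswith z "+" = false := by simpa using hp
      rw [if_neg hp, if_pos (hall z List.mem_cons_self), hp']
      rfl

theorem minusOK_all_minus (zs : List String) (h : ∀ u ∈ zs, PySem.Str.startswith u "-" = true) :
    minusOK zs = true := by
  induction zs with
  | nil => rfl
  | cons z zs ih =>
    rw [minusOK_cons, if_pos (h z List.mem_cons_self)]
    exact ih (fun u hu => h u (List.mem_cons_of_mem _ hu))

theorem plusOK_all_plus (zs : List String) (h : ∀ u ∈ zs, PySem.Str.startswith u "+" = true) :
    plusOK zs = true := by
  induction zs with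
  | nil => rfl
  | cons z zs ih =>
    rw [plusOK_cons, if_pos (h z List.mem_cons_self)]
    exact ih (fun u hu => h u (List.mem_cons_of_mem _ hu))

theorem minusOK_all_plus (zs : List String) (h : ∀ u ∈ zs, PySem.Str.startswith u "+" = true) :
    minusOK zs = true := by
  cases zs with
  | nil => rfl
  | cons z zs =>
    have hp := h z List.mem_cons_self
    rw [minusOK_cons, if_neg (ne_true_of_false (not_minus_of_plus z hp)), if_pos hp]
    exact plusOK_all_plus zs (fun u hu => h u (List.mem_cons_of_mem _ hu))

-- minusOK = true means no '-' line after a '+' line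
theorem minusOK_mono (hl : List String) :
    (∀ u ∈ hl, isSignA u = true) → minusOK hl = true →
    ∀ (i j : Nat) (u v : String), i < j → hl[i]? = some u → hl[j]? = some v →
      PySem.Str.startswith u "+" = true → PySem.Str.startswith v "-" = false := by
  induction hl with
  | nil => intro _ _ i j u v hij hu hv hup; simp at hu
  | cons z zs ih =>
    intro hall h i j u v hij hu hv hup
    obtain ⟨j, rfl⟩ : ∃ j', j = j' + 1 := ⟨j - 1, by omega⟩
    have hv' : zs[j]? = some v := by simpa using hv
    have hvmem : v ∈ zs := List.mem_of_getElem? hv'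
    cases i with
    | zero =>
      have hu' : z = u := by simpa using hu
      subst hu'
      rw [minusOK_cons, if_neg (ne_true_of_false (not_minus_of_plus z hup)), if_pos hup,
        plusOK_allSign zs (fun u hu => hall u (List.mem_cons_of_mem _ hu))] at h
      have hvp : PySem.Str.startswith v "+" = true := List.all_eq_true.mp h v hvmem
      exact not_minus_of_plus v hvp
    | succ i =>
      have hu' : zs[i]? = some u := by simpa using hu
      by_cases hm : PySem.Str.startswith z "-" = true
      · have hmm : minusOK zs = true := by
          rw [minusOK_cons, if_pos hm] at h; exact h
        exact ih (fun u hu => hall u (List.mem_cons_of_mem _ hu)) hmm i j u v (by omega)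
          hu' hv' hup
      · by_cases hp : PySem.Str.startswith z "+" = true
        · have hpp : plusOK zs = true := by
            rw [minusOK_cons, if_neg hm, if_pos hp] at h; exact h
          rw [plusOK_allSign zs (fun u hu => hall u (List.mem_cons_of_mem _ hu))] at hpp
          have hvp : PySem.Str.startswith v "+" = true := List.all_eq_true.mp hpp v hvmem
          exact not_minus_of_plus v hvp
        · rcases sign_cases z (hall z List.mem_cons_self) with h' | h'
          · exact absurd h' hm
          · exact absurd h' hp

-- minusOK = false (on all-sign input) yields a '+' line strictly before a '-' line
theorem minusOK_neg (hl : List String) :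
    (∀ u ∈ hl, isSignA u = true) → minusOK hl = false →
    ∃ (i j : Nat) (u v : String), i < j ∧ hl[i]? = some u ∧ hl[j]? = some v ∧
      PySem.Str.startswith u "+" = true ∧ PySem.Str.startswith v "-" = true := by
  induction hl with
  | nil => intro _ h; exact absurd h (by simp [minusOK])
  | cons z zs ih =>
    intro hall h
    by_cases hm : PySem.Str.startswith z "-" = true
    · have hmm : minusOK zs = false := by
        rw [minusOK_cons, if_pos hm] at h; exact h
      obtain ⟨i, j, u, v, hij, hu, hv, hup, hvm⟩ :=
        ih (fun u hu => hall u (List.mem_cons_of_mem _ hu)) hmm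
      exact ⟨i + 1, j + 1, u, v, by omega, by simpa using hu, by simpa using hv, hup, hvm⟩
    · by_cases hp : PySem.Str.startswith z "+" = true
      · have hpp : plusOK zs = false := by
          rw [minusOK_cons, if_neg hm, if_pos hp] at h; exact h
        rw [plusOK_allSign zs (fun u hu => hall u (List.mem_cons_of_mem _ hu))] at hpp
        have hx : ∃ v ∈ zs, ¬ PySem.Str.startswith v "+" = true := by
          by_contra hc
          rw [List.all_eq_true.mpr (fun v hv => by
            cases hvx : PySem.Str.startswith v "+"
            · exact absurd ⟨v, hv, by rw [hvx]; exact Bool.false_ne_true⟩ hc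
            · rfl)] at hpp
          exact absurd hpp (by simp)
        obtain ⟨v, hvmem, hvp⟩ := hx
        have hvm : PySem.Str.startswith v "-" = true := by
          rcases sign_cases v (hall v (List.mem_cons_of_mem _ hvmem)) with h' | h'
          · exact h'
          · exact absurd h' hvp
        obtain ⟨j, hj⟩ := List.getElem?_of_mem hvmem
        exact ⟨0, j + 1, z, v, by omega, by simp, by simpa using hj, hp, hvm⟩
      · rcases sign_cases z (hall z List.mem_cons_self) with h' | h'
        · exact absurd h' hm
        · exact absurd h' hp

-- minusOK is false when a non-sign line is followed (not necessarily adjacently) by a sign line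
theorem plusOK_false_of (zs : List String) (y : String) (hy : isSignA y = true)
    (h : ∃ x ∈ zs, isSignA x = false) : plusOK (zs ++ [y]) = false := by
  induction zs with
  | nil => obtain ⟨x, hx, _⟩ := h; simp at hx
  | cons z zs ih =>
    obtain ⟨x, hx, hxf⟩ := h
    rw [List.cons_append, plusOK_cons]
    by_cases hp : PySem.Str.startswith z "+" = true
    · rw [if_pos hp]
      apply ih
      refine ⟨x, ?_, hxf⟩
      rcases List.mem_cons.mp hx with h' | h'
      · exfalso; rw [h', sign_of_plus z hp] at hxf; exact absurd hxf (by simp)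
      · exact h'
    · rw [if_neg hp]
      by_cases hz : isSignA z = true
      · rw [if_pos hz]
      · rw [if_neg hz, tailOK_append_sign zs y hy]

theorem minusOK_false_of (zs : List String) (y : String) (hy : isSignA y = true)
    (h : ∃ x ∈ zs, isSignA x = false) : minusOK (zs ++ [y]) = false := by
  induction zs with
  | nil => obtain ⟨x, hx, _⟩ := h; simp at hx
  | cons z zs ih =>
    obtain ⟨x, hx, hxf⟩ := h
    rw [List.cons_append, minusOK_cons]
    by_cases hm : PySem.Str.startswith z "-" = true
    · rw [if_pos hm]
      apply ih
      refine ⟨x, ?_, hxf⟩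
      rcases List.mem_cons.mp hx with h' | h'
      · exfalso; rw [h', sign_of_minus z hm] at hxf; exact absurd hxf (by simp)
      · exact h'
    · rw [if_neg hm]
      by_cases hp : PySem.Str.startswith z "+" = true
      · rw [if_pos hp]
        apply plusOK_false_of zs y hy
        refine ⟨x, ?_, hxf⟩
        rcases List.mem_cons.mp hx with h' | h'
        · exfalso; rw [h', sign_of_plus z hp] at hxf; exact absurd hxf (by simp)
        · exact h'
      · rw [if_neg hp, tailOK_append_sign zs y hy]

-- ---- set facts ----

theorem nodup_all_eq {α : Type} (l : List α) (c : α) (hnd : l.Nodup) (hne : l ≠ [])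
    (hall : ∀ x ∈ l, x = c) : l = [c] := by
  cases l with
  | nil => exact absurd rfl hne
  | cons a t =>
    have ha : a = c := hall a List.mem_cons_self
    cases t with
    | nil => rw [ha]
    | cons b t =>
      have hb : b = c := hall b (List.mem_cons_of_mem _ List.mem_cons_self)
      rw [List.nodup_cons] at hnd
      exact absurd (by rw [ha, hb]; exact List.mem_cons_self) hnd.1

theorem setlen_one_all_eq (cs : List Char) (h : PySem.Set.len (PySem.Set.ofList cs) = 1) :
    ∀ x ∈ cs, ∀ y ∈ cs, x = y := by
  have hlen : (PySem.Set.ofList cs).length = 1 := by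
    simpa [PySem.Set.len] using h
  obtain ⟨c, hc⟩ := List.length_eq_one_iff.mp hlen
  intro x hx y hy
  have hx' : x ∈ PySem.Set.ofList cs := (PySem.Set.mem_ofList cs x).mpr hx
  have hy' : y ∈ PySem.Set.ofList cs := (PySem.Set.mem_ofList cs y).mpr hy
  rw [hc] at hx' hy'
  simp at hx' hy'
  rw [hx', hy']

theorem all_eq_setlen_one (cs : List Char) (c0 : Char) (hne : cs ≠ [])
    (hall : ∀ x ∈ cs, x = c0) : PySem.Set.len (PySem.Set.ofList cs) = 1 := by
  have hmem : c0 ∈ PySem.Set.ofList cs := by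
    rw [PySem.Set.mem_ofList]
    cases cs with
    | nil => exact absurd rfl hne
    | cons a t => rw [← hall a List.mem_cons_self]; exact List.mem_cons_self
  have heq : PySem.Set.ofList cs = [c0] :=
    nodup_all_eq _ c0 (PySem.Set.nodup_ofList cs) (List.ne_nil_of_mem hmem)
      (fun x hx => hall x ((PySem.Set.mem_ofList cs x).mp hx))
  simp [PySem.Set.len, heq]

theorem both_present (cs : List Char) (hne : cs ≠ [])
    (hall : ∀ c ∈ cs, c = '-' ∨ c = '+')
    (h : ¬ PySem.Set.len (PySem.Set.ofList cs) = 1) : '-' ∈ cs ∧ '+' ∈ cs := by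
  by_cases hm : '-' ∈ cs
  · by_cases hp : '+' ∈ cs
    · exact ⟨hm, hp⟩
    · exfalso
      apply h
      apply all_eq_setlen_one cs '-' hne
      intro x hx
      rcases hall x hx with h' | h'
      · exact h'
      · exact absurd (h' ▸ hx) hp
  · exfalso
    apply h
    apply all_eq_setlen_one cs '+' hne
    intro x hx
    rcases hall x hx with h' | h'
    · exact absurd (h' ▸ hx) hm
    · exact h'

-- ---- core case: first and last line carry a sign ----

theorem A_core (l : String) (ls : List String) (ys : List String) (y : String)
    (hcat : l :: ls = ys ++ [y]) (hsl : isSignA l = true) (hsy : isSignA y = true) :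
    is_valid_hunk (l :: ls) = headOK (l :: ls) := by
  have hrev : (l :: ls).reverse = y :: ys.reverse := by rw [hcat]; simp
  rw [headOK_signHead l ls hsl]
  simp only [is_valid_hunk, PySem.List.slice?_none_none_neg_one, Option.getD_some]
  rw [hrev, findStartA_cons, if_pos hsl, findEndA_cons, if_pos hsy]
  have hg : ((0 : Int) == -1 || ((((l :: ls).length : Int)) - 0 == -1)) = false :=
    pvGuardFalse _ _ (by omega) (by simp only [List.length_cons]; push_cast; omega)
  rw [hg]
  simp only [Bool.false_eq_true, if_false]
  have hblock : PySem.List.slice (l :: ls) (some 0) (some (((l :: ls).length : Int) - 0)) =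
      l :: ls := by
    rw [PySem.List.slice_toNat]
    · have h1 : (((l :: ls).length : Int) - 0).toNat = (l :: ls).length := by omega
      rw [show ((0 : Int)).toNat = 0 from rfl, h1]
      simp
    all_goals omega
  rw [hblock]
  by_cases hall : allSignA (l :: ls) = true
  · rw [hall]
    simp only [Bool.not_true, Bool.false_eq_true, if_false]
    have hall' : ∀ u ∈ l :: ls, isSignA u = true := by
      rw [allSignA_eq_all] at hall
      exact fun u hu => List.all_eq_true.mp hall u hu
    have hcs_all : ∀ c ∈ (l :: ls).map firstCharA, c = '-' ∨ c = '+' := by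
      intro c hc
      rw [List.mem_map] at hc
      obtain ⟨u, hu, rfl⟩ := hc
      exact sign_firstChar_cases u (hall' u hu)
    by_cases hset : PySem.Set.len (PySem.Set.ofList ((l :: ls).map firstCharA)) = 1
    · rw [if_pos hset]
      have halleq := setlen_one_all_eq _ hset
      have hc0 : firstCharA l ∈ (l :: ls).map firstCharA :=
        List.mem_map_of_mem List.mem_cons_self
      rcases sign_firstChar_cases l hsl with hc | hc
      · symm
        apply minusOK_all_minus
        intro u hu
        apply firstChar_minus_startswith u (hall' u hu)
        rw [halleq _ (List.mem_map_of_mem hu) _ hc0, hc]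
      · symm
        apply minusOK_all_plus
        intro u hu
        apply firstChar_plus_startswith u (hall' u hu)
        rw [halleq _ (List.mem_map_of_mem hu) _ hc0, hc]
    · rw [if_neg hset]
      have hne : (l :: ls).map firstCharA ≠ [] := by simp
      obtain ⟨hmm, hpm⟩ := both_present _ hne hcs_all hset
      obtain ⟨k, hk⟩ := Option.isSome_iff_exists.mp
        ((PySem.List.index?_isSome_iff _ _).mpr hpm)
      obtain ⟨r, hr⟩ := Option.isSome_iff_exists.mp
        ((PySem.List.index?_isSome_iff ((l :: ls).map firstCharA).reverse '-').mpr
          (List.mem_reverse.mpr hmm))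
      rw [hk, hr]
      simp only [Option.getD_some]
      obtain ⟨hklt, hkel, hkmin⟩ := PySem.List.getElem_of_index?_eq_some hk
      obtain ⟨hrlt, hrel, hrmax⟩ := PySem.List.getElem_of_index?_eq_some hr
      have hlen : ((l :: ls).map firstCharA).length = (l :: ls).length := by simp
      have hrlt' : r < (l :: ls).length := by
        rw [List.length_reverse, hlen] at hrlt; exact hrlt
      have hklt' : k < (l :: ls).length := by rw [hlen] at hklt; exact hklt
      -- position of the last '-'
      have hm_el : ((l :: ls).map firstCharA)[(l :: ls).length - 1 - r]'(by omega) = '-' := by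
        rw [List.getElem_reverse] at hrel
        simpa [hlen] using hrel
      have hmax : ∀ j (hj : j < (l :: ls).length), (l :: ls).length - 1 - r < j →
          ((l :: ls).map firstCharA)[j]'(by omega) ≠ '-' := by
        intro j hj hmj
        have ht : ((l :: ls).map firstCharA).length - 1 - j < r := by omega
        have h2 := hrmax (((l :: ls).map firstCharA).length - 1 - j) ht
        rw [List.getElem_reverse] at h2
        have hj' : j < ls.length + 1 := by simpa using hj
        have hidx2 : ls.length - (ls.length - j) = j := by omega
        simpa [hidx2] using h2
      by_cases hcond : ((((l :: ls).map firstCharA).length : Int) - (r : Int) - 1 > (k : Int))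
      · rw [if_pos hcond]
        cases hMok : minusOK (l :: ls)
        · rfl
        · exfalso
          have hmono := minusOK_mono (l :: ls) hall' hMok
          have hkm : k < (l :: ls).length - 1 - r := by
            rw [hlen] at hcond; omega
          have hm_lt : (l :: ls).length - 1 - r < (l :: ls).length := by omega
          have hu : (l :: ls)[k]? = some ((l :: ls)[k]'hklt') := List.getElem?_eq_getElem hklt'
          have hv : (l :: ls)[(l :: ls).length - 1 - r]?
              = some ((l :: ls)[(l :: ls).length - 1 - r]'hm_lt) :=
            List.getElem?_eq_getElem hm_lt
          have hup : PySem.Str.startswith ((l :: ls)[k]'hklt') "+" = true := by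
            apply firstChar_plus_startswith _ (hall' _ (List.getElem_mem hklt'))
            have := hkel
            rw [List.getElem_map] at this
            exact this
          have hvm : PySem.Str.startswith ((l :: ls)[(l :: ls).length - 1 - r]'hm_lt) "-"
              = true := by
            apply firstChar_minus_startswith _ (hall' _ (List.getElem_mem hm_lt))
            have := hm_el
            rw [List.getElem_map] at this
            exact this
          have := hmono k ((l :: ls).length - 1 - r) _ _ hkm hu hv hup
          rw [hvm] at this
          exact absurd this (by simp)
      · rw [if_neg hcond]
        cases hMok : minusOK (l :: ls)
        · exfalso
          obtain ⟨i, j, u, v, hij, hu, hv, hup, hvm⟩ := minusOK_neg (l :: ls) hall' hMok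
          obtain ⟨hj_lt, hvj⟩ := List.getElem?_eq_some_iff.mp hv
          obtain ⟨hi_lt, hui⟩ := List.getElem?_eq_some_iff.mp hu
          have hci : ((l :: ls).map firstCharA)[i]'(by rw [hlen]; omega) = '+' := by
            rw [List.getElem_map, hui]
            exact startswith_plus_firstChar u hup
          have hcj : ((l :: ls).map firstCharA)[j]'(by rw [hlen]; omega) = '-' := by
            rw [List.getElem_map, hvj]
            exact startswith_minus_firstChar v hvm
          have hki : k ≤ i := by
            by_contra h'
            exact hkmin i (by omega) hci
          have hjm : j ≤ (l :: ls).length - 1 - r := by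
            by_contra h'
            exact hmax j hj_lt (by omega) hcj
          rw [hlen] at hcond
          omega
        · rfl
  · have hallf : allSignA (l :: ls) = false := by simpa using hall
    rw [hallf]
    simp only [Bool.not_false, if_true]
    have hx : ∃ x ∈ l :: ls, isSignA x = false := by
      by_contra hc
      apply absurd hallf
      rw [allSignA_eq_all, List.all_eq_true.mpr (fun u hu => by
        cases hux : isSignA u
        · exact absurd ⟨u, hu, hux⟩ hc
        · rfl)]
      simp
    obtain ⟨x, hxmem, hxf⟩ := hx
    have hxys : x ∈ ys := by
      rw [hcat] at hxmem
      rcases List.mem_append.mp hxmem with h' | h'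
      · exact h'
      · exfalso
        have : x = y := by simpa using h'
        rw [this, hsy] at hxf
        exact absurd hxf (by simp)
    rw [hcat, minusOK_false_of ys y hsy ⟨x, hxys, hxf⟩]

theorem A_eq_headOK (hl : List String) : is_valid_hunk hl = headOK hl := by
  generalize hn : hl.length = n
  induction n using Nat.strong_induction_on generalizing hl with
  | _ n IH =>
  cases hl with
  | nil => decide
  | cons l ls =>
    by_cases hsl : isSignA l = true
    · obtain ⟨ys, y, hcat⟩ : ∃ ys y, l :: ls = ys ++ [y] := by
        rcases List.eq_nil_or_concat (l :: ls) with h | ⟨ys, y, h⟩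
        · exact absurd h (by simp)
        · exact ⟨ys, y, by simpa [List.concat_eq_append] using h⟩
      by_cases hsy : isSignA y = true
      · exact A_core l ls ys y hcat hsl hsy
      · have hy' : isSignA y = false := by simpa using hsy
        have hylen : ys.length < n := by
          have h1 : ls.length + 1 = ys.length + 1 := by
            have := congrArg List.length hcat
            simpa using this
          simp only [List.length_cons] at hn
          omega
        rw [hcat, A_stripR ys y hy', headOK_stripR ys y hy']
        exact IH ys.length hylen ys rfl
    · have hl' : isSignA l = false := by simpa using hsl
      rcases nonsign_split l hl' with ⟨h1, h2⟩
      rw [A_stripL l ls hl', headOK_cons, if_neg (ne_true_of_false h1),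
        if_neg (ne_true_of_false h2)]
      simp only [List.length_cons] at hn
      exact IH ls.length (by omega) ls rfl

-- ===== VERDICT (by name: the statement is the Claim_ definition above) =====
theorem is_valid_hunk_spec : Claim_equal_is_valid_hunk := by
  intro hl _
  unfold Spec_is_valid_hunk
  rw [A_eq_headOK, B_eq_headOK]
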